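-- pv_equiv track=rewrite | github.com/pragdave/cs3342_09 | CheckSentence.py | checkSentence
-- ===== SOURCE A (Python) =====
-- def checkSentence(s):
--     # check for period
--     if s.find('.'):
--         # get rid of the period first
--         s = s.replace('.', '')
--         # split the sentence up into words
--         words = s.split()
--         words.append('.')
--     else:
--         return False
--
--     # use state to keep track of the current state
--     state = 0
--     end = False
--     # check each word and see if we can move on to the next state
--     for w in words:
--         w = w.lower()
--         # state 0
--         if state == 0:
--             if w == 'the':
--                 state += 1
--             else:
--                 return False
--         elif state == 1:
--             if w == 'smelly' or w == 'lazy':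
--                 continue
--             elif w == 'cat' or w == 'dog':
--                 state = 2
--             else:
--                 return False
--         elif state == 2:
--             if w == 'ran' or w == 'ate':
--                 state += 1
--             else:
--                 return False
--         elif state == 3:
--             if w == 'slowly' or w == 'noisily':
--                 continue
--             elif w == '.':
--                 end = True
--             else:
--                 return False
--     return end
-- ===== SOURCE B (Python) =====
-- GRAMMAR = [
--     (('the',), False),
--     (('smelly', 'lazy'), True),
--     (('cat', 'dog'), False),
--     (('ran', 'ate'), False),
--     (('slowly', 'noisily'), True),
--     (('.',), False),
-- ]
--
--
-- def checkSentence(s):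
--     # same preprocessing as the original: period at index 0 rejects outright
--     if not s.find('.'):
--         return False
--     rest = [w.lower() for w in s.replace('.', '').split()]
--     rest.append('.')
--     # match the token stream against the declarative grammar table
--     for opts, star in GRAMMAR:
--         if star:
--             while rest and rest[0] in opts:
--                 rest = rest[1:]
--         elif rest and rest[0] in opts:
--             rest = rest[1:]
--         else:
--             return False
--     return not rest
-- ===== Notes on version B (the rewrite author's own statement) =====
-- stated objective: idiomatic
-- what changed: Replaced the hand-rolled state-machine loop (mutable state/end variables with per-state branches) by a declarative grammar table matched left-to-right over the token list, keeping A's preprocessing (including its period-at-index-zero truthiness guard) identical.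
import Mathlib
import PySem

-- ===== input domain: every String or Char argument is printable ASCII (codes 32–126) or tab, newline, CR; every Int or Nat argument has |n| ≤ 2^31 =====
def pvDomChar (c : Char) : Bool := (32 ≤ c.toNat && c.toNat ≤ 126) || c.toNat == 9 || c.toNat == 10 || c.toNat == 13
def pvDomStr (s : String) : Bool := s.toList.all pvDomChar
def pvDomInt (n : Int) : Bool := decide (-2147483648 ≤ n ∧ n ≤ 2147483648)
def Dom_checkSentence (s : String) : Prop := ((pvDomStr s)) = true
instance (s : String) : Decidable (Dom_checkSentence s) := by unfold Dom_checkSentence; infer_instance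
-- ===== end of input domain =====

-- B replaces A's explicit state-variable loop by a declarative grammar table matched
-- left-to-right over the token list (same preprocessing, including A's period-at-index-zero guard);
-- objective: idiomatic, same cost.

-- ===== PORT A =====
-- the for-loop over words with mutable (state, end) and early returns
def pvALoop : List String → Int → Bool → Bool
  | [], _, e => e
  | w :: ws, state, e =>
    let w := PySem.Str.lower w
    if state == 0 then
      if w == "the" then pvALoop ws (state + 1) e else false
    else if state == 1 then
      if w == "smelly" || w == "lazy" then pvALoop ws state e
      else if w == "cat" || w == "dog" then pvALoop ws 2 e
      else false
    else if state == 2 then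
      if w == "ran" || w == "ate" then pvALoop ws (state + 1) e
      else false
    else if state == 3 then
      if w == "slowly" || w == "noisily" then pvALoop ws state e
      else if w == "." then pvALoop ws state true
      else false
    else pvALoop ws state e

def checkSentence (s : String) : Bool :=
  if PySem.Str.find s "." ≠ 0 then
    let s := PySem.Str.replace s "." ""
    let words := PySem.Str.split₀ s
    let words := words ++ ["."]
    pvALoop words 0 false
  else false

-- ===== PORT B =====
def pvGrammar : List (List String × Bool) :=
  [(["the"], false), (["smelly", "lazy"], true), (["cat", "dog"], false),
   (["ran", "ate"], false), (["slowly", "noisily"], true), (["."], false)]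

-- the 'while rest and rest[0] in opts: rest = rest[1:]' loop
def pvSkip (opts : List String) : List String → List String
  | [] => []
  | t :: ts => if opts.contains t then pvSkip opts ts else t :: ts

-- the for-loop over the grammar table; none = the early 'return False'
def pvMatch : List (List String × Bool) → List String → Option (List String)
  | [], rest => some rest
  | (opts, star) :: g, rest =>
    if star then pvMatch g (pvSkip opts rest)
    else
      match rest with
      | t :: ts => if opts.contains t then pvMatch g ts else none
      | [] => none

def checkSentence_alt (s : String) : Bool :=
  if PySem.Str.find s "." ≠ 0 then
    let rest := (PySem.Str.split₀ (PySem.Str.replace s "." "")).map PySem.Str.lower ++ ["."]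
    match pvMatch pvGrammar rest with
    | some r => r.isEmpty
    | none => false
  else false

-- ===== PRECONDITION & SPEC =====
def Spec_checkSentence (s : String) (out : Bool) : Prop := out = checkSentence_alt s
instance (s : String) (out : Bool) : Decidable (Spec_checkSentence s out) := by unfold Spec_checkSentence; infer_instance

-- ===== CLAIM (what is proved, stated in full; the proofs are below) =====
def Claim_equal_checkSentence : Prop := ∀ (s : String), Dom_checkSentence s → Spec_checkSentence s (checkSentence s)

-- ===== LEMMAS AND PROOFS =====

-- replace(s, '.', '') leaves no '.' in the result
lemma pv_replace_go_no_dot : ∀ (fuel : Nat) (l acc : List Char), l.length ≤ fuel →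
    ('.' ∉ acc) → '.' ∉ PySem.Chars.replace.go ['.'] [] fuel l acc := by
  intro fuel
  induction fuel with
  | zero =>
    intro l acc hl ha
    have : l = [] := List.eq_nil_of_length_eq_zero (Nat.le_zero.mp hl)
    subst this
    simpa [PySem.Chars.replace.go] using ha
  | succ n ih =>
    intro l acc hl ha
    cases l with
    | nil => simpa [PySem.Chars.replace.go] using ha
    | cons c t =>
      by_cases hc : c = '.'
      · subst hc
        rw [show PySem.Chars.replace.go ['.'] [] (n+1) ('.' :: t) acc
              = PySem.Chars.replace.go ['.'] [] n t acc by
            simp [PySem.Chars.replace.go, List.isPrefixOf]]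
        exact ih t acc (by simpa using hl) ha
      · rw [show PySem.Chars.replace.go ['.'] [] (n+1) (c :: t) acc
              = PySem.Chars.replace.go ['.'] [] n t (c :: acc) by
            simp [PySem.Chars.replace.go, List.isPrefixOf, Ne.symm hc]]
        exact ih t (c :: acc) (by simpa using hl) (by simp [ha, Ne.symm hc])

lemma pv_no_dot_replace (cs : List Char) : '.' ∉ PySem.Chars.replace cs ['.'] [] := by
  rw [PySem.Chars.replace]
  simpa using pv_replace_go_no_dot cs.length cs [] le_rfl (by simp)

-- every word produced by split() draws its characters from the input
lemma pv_split_go_no_dot : ∀ (l cur : List Char) (acc : List (List Char)),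
    ('.' ∉ l) → ('.' ∉ cur) → (∀ w ∈ acc, '.' ∉ w) →
    ∀ w ∈ PySem.Chars.split₀.go l cur acc, '.' ∉ w := by
  intro l
  induction l with
  | nil =>
    intro cur acc _ hcur hacc w hw
    rw [PySem.Chars.split₀.go] at hw
    by_cases h : cur.isEmpty = true
    · simp [h] at hw
      exact hacc _ hw
    · simp [h] at hw
      rcases hw with h1 | h2
      · exact hacc _ h1
      · subst h2; simpa using hcur
  | cons c t ih =>
    intro cur acc hc hcur hacc w hw
    have hct : '.' ∉ t := fun h => hc (List.mem_cons_of_mem _ h)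
    have hcc : c ≠ '.' := fun h => hc (h ▸ List.mem_cons_self ..)
    rw [PySem.Chars.split₀.go] at hw
    by_cases hs : PySem.Chars.isspace c = true
    · by_cases he : cur.isEmpty = true
      · simp [hs, he] at hw
        exact ih [] acc hct (by simp) hacc w hw
      · simp [hs, he] at hw
        refine ih [] (cur.reverse :: acc) hct (by simp) ?_ w hw
        intro v hv
        rcases List.mem_cons.mp hv with h1 | h2
        · subst h1; simpa using hcur
        · exact hacc _ h2
    · simp [hs] at hw
      exact ih (c :: cur) acc hct (by simp [hcur, Ne.symm hcc]) hacc w hw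

lemma pv_lower_char_ne_dot (c : Char) (h : c ≠ '.') : PySem.Chars.lowerChar c ≠ '.' := by
  rw [PySem.Chars.lowerChar]
  by_cases hu : PySem.Chars.isupper c = true
  · simp only [hu, if_pos]
    intro he
    have h1 : ('A' : Char) ≤ c ∧ c ≤ 'Z' := by
      rw [PySem.Chars.isupper] at hu; simpa using hu
    have h2 : (Char.ofNat (c.toNat + 32)).toNat = c.toNat + 32 := by
      rw [Char.toNat_ofNat, if_pos]
      have h3 : c.toNat ≤ 90 := h1.2
      simp [Nat.isValidChar]
      omega
    have h3 : c.toNat ≤ 90 := h1.2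
    have h4 : 65 ≤ c.toNat := h1.1
    have := congrArg Char.toNat he
    rw [h2] at this
    have hd : ('.' : Char).toNat = 46 := rfl
    omega
  · simpa [hu] using h

lemma pv_lower_ne_dot (w : String) (h : '.' ∉ w.toList) : PySem.Str.lower w ≠ "." := by
  intro he
  have h2 : PySem.Chars.lower w.toList = ['.'] := by
    have := congrArg String.toList he
    simpa using this
  rw [PySem.Chars.lower] at h2
  cases hl : w.toList with
  | nil => rw [hl] at h2; simp at h2
  | cons c t =>
    rw [hl] at h2
    cases t with
    | nil =>
      simp at h2
      have hc : c ≠ '.' := fun hcc => (hl ▸ h) (hcc ▸ List.mem_cons_self ..)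
      exact pv_lower_char_ne_dot c hc h2
    | cons d u => simp at h2

-- stage lemmas: A's state k behaves as B's grammar suffix, provided no token lowers to "."
lemma pv_stage3 (e : Bool) : ∀ ws : List String, (∀ w ∈ ws, PySem.Str.lower w ≠ ".") →
    pvALoop (ws ++ ["."]) 3 e =
      (match pvMatch [(["slowly", "noisily"], true), (["."], false)]
          (ws.map PySem.Str.lower ++ ["."]) with
       | some r => r.isEmpty | none => false) := by
  intro ws
  induction ws generalizing e with
  | nil => intro _; cases e <;> decide
  | cons w ws ih =>
    intro h
    have hw : PySem.Str.lower w ≠ "." := h w (List.mem_cons_self ..)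
    have h' := fun x hx => h x (List.mem_cons_of_mem _ hx)
    by_cases h1 : PySem.Str.lower w = "slowly"
    · simp [pvALoop, pvMatch, pvSkip, h1, ih e h']
    · by_cases h2 : PySem.Str.lower w = "noisily"
      · simp [pvALoop, pvMatch, pvSkip, h2, ih e h']
      · simp [pvALoop, pvMatch, pvSkip, h1, h2, hw]

lemma pv_stage2 (e : Bool) : ∀ ws : List String, (∀ w ∈ ws, PySem.Str.lower w ≠ ".") →
    pvALoop (ws ++ ["."]) 2 e =
      (match pvMatch [(["ran", "ate"], false), (["slowly", "noisily"], true), (["."], false)]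
          (ws.map PySem.Str.lower ++ ["."]) with
       | some r => r.isEmpty | none => false) := by
  intro ws
  cases ws with
  | nil => intro _; cases e <;> decide
  | cons w ws =>
    intro h
    have h' := fun x hx => h x (List.mem_cons_of_mem _ hx)
    by_cases h1 : PySem.Str.lower w = "ran"
    · simp [pvALoop, pvMatch, h1, pv_stage3 e ws h']
    · by_cases h2 : PySem.Str.lower w = "ate"
      · simp [pvALoop, pvMatch, h2, pv_stage3 e ws h']
      · simp [pvALoop, pvMatch, h1, h2]

lemma pv_stage1 (e : Bool) : ∀ ws : List String, (∀ w ∈ ws, PySem.Str.lower w ≠ ".") →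
    pvALoop (ws ++ ["."]) 1 e =
      (match pvMatch [(["smelly", "lazy"], true), (["cat", "dog"], false),
          (["ran", "ate"], false), (["slowly", "noisily"], true), (["."], false)]
          (ws.map PySem.Str.lower ++ ["."]) with
       | some r => r.isEmpty | none => false) := by
  intro ws
  induction ws generalizing e with
  | nil => intro _; cases e <;> decide
  | cons w ws ih =>
    intro h
    have h' := fun x hx => h x (List.mem_cons_of_mem _ hx)
    by_cases h1 : PySem.Str.lower w = "smelly"
    · simp [pvALoop, pvMatch, pvSkip, h1, ih e h']
    · by_cases h2 : PySem.Str.lower w = "lazy"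
      · simp [pvALoop, pvMatch, pvSkip, h2, ih e h']
      · by_cases h3 : PySem.Str.lower w = "cat"
        · simp [pvALoop, pvMatch, pvSkip, h1, h2, h3, pv_stage2 e ws h']
        · by_cases h4 : PySem.Str.lower w = "dog"
          · simp [pvALoop, pvMatch, pvSkip, h1, h2, h4, pv_stage2 e ws h']
          · simp [pvALoop, pvMatch, pvSkip, h1, h2, h3, h4]

lemma pv_stage0 (e : Bool) : ∀ ws : List String, (∀ w ∈ ws, PySem.Str.lower w ≠ ".") →
    pvALoop (ws ++ ["."]) 0 e =
      (match pvMatch pvGrammar (ws.map PySem.Str.lower ++ ["."]) with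
       | some r => r.isEmpty | none => false) := by
  intro ws
  cases ws with
  | nil => intro _; cases e <;> decide
  | cons w ws =>
    intro h
    have h' := fun x hx => h x (List.mem_cons_of_mem _ hx)
    by_cases h1 : PySem.Str.lower w = "the"
    · simp [pvALoop, pvMatch, pvGrammar, h1, pv_stage1 e ws h']
    · simp [pvALoop, pvMatch, pvGrammar, h1]

-- no word of split(replace(s, '.', '')) lowercases to "."
lemma pv_words_ok (s : String) :
    ∀ w ∈ PySem.Str.split₀ (PySem.Str.replace s "." ""), PySem.Str.lower w ≠ "." := by
  intro w hw
  rw [PySem.Str.split₀] at hw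
  rcases List.mem_map.mp hw with ⟨v, hv, rfl⟩
  apply pv_lower_ne_dot
  have hrep : (PySem.Str.replace s "." "").toList = PySem.Chars.replace s.toList ['.'] [] := by
    simp [PySem.Str.replace]
  rw [PySem.Chars.split₀, hrep] at hv
  have hnd := pv_split_go_no_dot (PySem.Chars.replace s.toList ['.'] []) [] []
    (pv_no_dot_replace s.toList) (by simp) (by simp) v hv
  simpa using hnd

-- ===== VERDICT (by name: the statement is the Claim_ definition above) =====
theorem checkSentence_spec : Claim_equal_checkSentence := by
  intro s _hDom
  unfold Spec_checkSentence checkSentence checkSentence_alt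
  by_cases hf : PySem.Str.find s "." = 0
  · rw [if_neg (fun h => h hf), if_neg (fun h => h hf)]
  · rw [if_pos hf, if_pos hf]
    exact pv_stage0 false _ (pv_words_ok s)
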